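-- pv_equiv track=rewrite | github.com/kvark/infermark | scripts/update_results.py | group_by_platform
-- ===== SOURCE A (Python) =====
-- def extract_platform(row):
--     """Extract the platform name from a table row's first data cell.
--
--     Returns the platform name (possibly empty for continuation rows).
--     """
--     cells = row.split("|")
--     if len(cells) < 3:
--         return ""
--     return cells[1].strip()
--
-- def group_by_platform(rows):
--     """Group rows into (platform_name, [rows]) pairs.
--
--     Continuation rows (empty first cell) belong to the preceding platform.
--     """
--     groups = []  # [(platform, [row_lines])]
--     current_platform = None
--     current_rows = []
--
--     for row in rows:
--         platform = extract_platform(row)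
--         if platform:
--             if current_platform is not None:
--                 groups.append((current_platform, current_rows))
--             current_platform = platform
--             current_rows = [row]
--         else:
--             current_rows.append(row)
--
--     if current_platform is not None:
--         groups.append((current_platform, current_rows))
--
--     return groups
-- ===== SOURCE B (Python) =====
-- def extract_platform(row):
--     cells = row.split("|")
--     if len(cells) < 3:
--         return ""
--     return cells[1].strip()
--
-- def group_by_platform(rows):
--     # Skip leading orphan continuation rows, then repeatedly peel off a
--     # header row together with the span of continuation rows following it.
--     n = len(rows)
--     k = 0
--     while k < n and not extract_platform(rows[k]):
--         k += 1
--     groups = []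
--     while k < n:
--         j = k + 1
--         while j < n and not extract_platform(rows[j]):
--             j += 1
--         groups.append((extract_platform(rows[k]), rows[k:j]))
--         k = j
--     return groups
-- ===== Notes on version B (the rewrite author's own statement) =====
-- stated objective: alternative
-- what changed: A threads a mutable accumulator (current_platform/current_rows) through one stateful loop with a post-loop flush; B instead drops leading orphan rows and then recursively peels off each header row together with the span of continuation rows following it, with no carried group state or final flush.
import Mathlib
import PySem

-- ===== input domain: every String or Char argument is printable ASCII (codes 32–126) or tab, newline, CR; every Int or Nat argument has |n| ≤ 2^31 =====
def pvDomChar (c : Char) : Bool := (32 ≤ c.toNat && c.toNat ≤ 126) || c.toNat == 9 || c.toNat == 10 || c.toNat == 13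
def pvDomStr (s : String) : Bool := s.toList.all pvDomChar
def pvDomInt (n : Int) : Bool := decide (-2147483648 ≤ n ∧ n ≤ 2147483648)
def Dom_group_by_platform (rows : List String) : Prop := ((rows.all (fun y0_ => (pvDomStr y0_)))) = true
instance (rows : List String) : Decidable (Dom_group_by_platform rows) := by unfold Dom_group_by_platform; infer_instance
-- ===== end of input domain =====

-- B replaces A's accumulator-state loop with a recursive dropWhile/span decomposition (objective: alternative, same cost).

-- ===== PORT A =====
def extract_platform (row : String) : String :=
  let cells := (PySem.Str.split? row "|").getD []  -- sep = "|" ≠ "", so split? is always some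
  if cells.length < 3 then ""
  else PySem.Str.strip ((PySem.List.pyGet? cells 1).getD "")

def stepA (st : List (String × List String) × Option String × List String) (row : String) :
    List (String × List String) × Option String × List String :=
  let p := extract_platform row
  if p == "" then
    (st.1, st.2.1, st.2.2 ++ [row])
  else
    match st.2.1 with
    | some c => (st.1 ++ [(c, st.2.2)], some p, [row])
    | none => (st.1, some p, [row])

def group_by_platform (rows : List String) : List (String × List String) :=
  let st := rows.foldl stepA ([], none, [])
  match st.2.1 with
  | some c => st.1 ++ [(c, st.2.2)]
  | none => st.1

-- ===== PORT B =====
def contRow (row : String) : Bool := extract_platform row == ""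

def groupSpans : List String → List (String × List String)
  | [] => []
  | r :: rs =>
      (extract_platform r, r :: rs.takeWhile contRow) :: groupSpans (rs.dropWhile contRow)
  termination_by l => l.length
  decreasing_by
    simpa using Nat.lt_succ_of_le (rs.length_dropWhile_le contRow)

def group_by_platform_alt (rows : List String) : List (String × List String) :=
  groupSpans (rows.dropWhile contRow)

-- ===== PRECONDITION & SPEC =====
def Spec_group_by_platform (rows : List String) (out : List (String × List String)) : Prop := out = group_by_platform_alt rows
instance (rows : List String) (out : List (String × List String)) : Decidable (Spec_group_by_platform rows out) := by unfold Spec_group_by_platform; infer_instance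

-- ===== CLAIM (what is proved, stated in full; the proofs are below) =====
def Claim_equal_group_by_platform : Prop := ∀ (rows : List String), Dom_group_by_platform rows → Spec_group_by_platform rows (group_by_platform rows)

-- ===== LEMMAS AND PROOFS =====
theorem groupSpans_cons (r : String) (rs : List String) :
    groupSpans (r :: rs) =
      (extract_platform r, r :: rs.takeWhile contRow) :: groupSpans (rs.dropWhile contRow) := by
  rw [groupSpans.eq_def]

def finishA (st : List (String × List String) × Option String × List String) :
    List (String × List String) :=
  match st.2.1 with
  | some c => st.1 ++ [(c, st.2.2)]
  | none => st.1

theorem foldA_some (rows : List String) (g : List (String × List String))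
    (c : String) (cr : List String) :
    finishA (rows.foldl stepA (g, some c, cr)) =
      g ++ (c, cr ++ rows.takeWhile contRow) :: groupSpans (rows.dropWhile contRow) := by
  induction rows generalizing g c cr with
  | nil => simp [finishA, groupSpans]
  | cons r rs ih =>
      by_cases h : contRow r = true
      · have h' : (extract_platform r == "") = true := h
        simp only [List.foldl_cons, stepA, h']
        rw [if_pos trivial, ih]
        simp [h]
      · have h' : (extract_platform r == "") = false := by
          simpa [contRow] using h
        simp only [List.foldl_cons, stepA, h']
        rw [if_neg (by simp)]
        rw [ih, List.takeWhile_cons_of_neg h, List.dropWhile_cons_of_neg h, groupSpans_cons]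
        simp

theorem foldA_none (rows : List String) (g : List (String × List String))
    (cr : List String) :
    finishA (rows.foldl stepA (g, none, cr)) = g ++ groupSpans (rows.dropWhile contRow) := by
  induction rows generalizing cr with
  | nil => simp [finishA, groupSpans]
  | cons r rs ih =>
      by_cases h : contRow r = true
      · have h' : (extract_platform r == "") = true := h
        simp only [List.foldl_cons, stepA, h']
        rw [if_pos trivial, ih, List.dropWhile_cons_of_pos h]
      · have h' : (extract_platform r == "") = false := by
          simpa [contRow] using h
        simp only [List.foldl_cons, stepA, h']
        rw [if_neg (by simp)]
        rw [foldA_some, List.dropWhile_cons_of_neg (by simp [h]), groupSpans_cons]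
        simp

-- ===== VERDICT (by name: the statement is the Claim_ definition above) =====
theorem group_by_platform_spec : Claim_equal_group_by_platform := by
  intro rows _
  show group_by_platform rows = group_by_platform_alt rows
  have := foldA_none rows [] []
  simpa [group_by_platform, group_by_platform_alt, finishA] using this
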